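-- pv_equiv track=rewrite | github.com/jjwwczy/LCCP | utils.py | deal_score
-- ===== SOURCE A (Python) =====
-- def deal_score(retIndex,calScoreMap):
--     scoreMap = {}
--     scoreIndexNames = {}
--     for city in retIndex.keys():
--         scoreMap[city] = {}
--         scoreIndexNames[city] = {}
--         for v in retIndex[city]:
--             indexName = v.split(",")
--             if(indexName[0] in scoreMap[city].keys()):
--                 scoreMap[city][indexName[0]] += calScoreMap[v]
--                 scoreIndexNames[city][indexName[0]] = scoreIndexNames[city][indexName[0]] + "," + indexName[1]
--             else:
--                 scoreMap[city][indexName[0]] = calScoreMap[v]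
--                 scoreIndexNames[city][indexName[0]] = indexName[1]
--     return scoreMap, scoreIndexNames
-- ===== SOURCE B (Python) =====
-- def deal_score(retIndex, calScoreMap):
--     # Two-pass per city: first group the raw strings by their index name,
--     # then aggregate each group with comprehensions.
--     scoreMap = {}
--     scoreIndexNames = {}
--     for city, values in retIndex.items():
--         groups = {}
--         for v in values:
--             groups.setdefault(v.split(",")[0], []).append(v)
--         scoreMap[city] = {k: sum(calScoreMap[v] for v in g) for k, g in groups.items()}
--         scoreIndexNames[city] = {k: ",".join(v.split(",")[1] for v in g) for k, g in groups.items()}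
--     return scoreMap, scoreIndexNames
-- ===== Notes on version B (the rewrite author's own statement) =====
-- stated objective: alternative
-- what changed: Replaces A's single interleaved loop that accumulates both result dicts key-by-key with a two-pass decomposition per city: one grouping pass (setdefault/append) building indexName -> list of raw strings, then dict comprehensions that aggregate each group with sum() and ','.join().
import Mathlib
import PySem

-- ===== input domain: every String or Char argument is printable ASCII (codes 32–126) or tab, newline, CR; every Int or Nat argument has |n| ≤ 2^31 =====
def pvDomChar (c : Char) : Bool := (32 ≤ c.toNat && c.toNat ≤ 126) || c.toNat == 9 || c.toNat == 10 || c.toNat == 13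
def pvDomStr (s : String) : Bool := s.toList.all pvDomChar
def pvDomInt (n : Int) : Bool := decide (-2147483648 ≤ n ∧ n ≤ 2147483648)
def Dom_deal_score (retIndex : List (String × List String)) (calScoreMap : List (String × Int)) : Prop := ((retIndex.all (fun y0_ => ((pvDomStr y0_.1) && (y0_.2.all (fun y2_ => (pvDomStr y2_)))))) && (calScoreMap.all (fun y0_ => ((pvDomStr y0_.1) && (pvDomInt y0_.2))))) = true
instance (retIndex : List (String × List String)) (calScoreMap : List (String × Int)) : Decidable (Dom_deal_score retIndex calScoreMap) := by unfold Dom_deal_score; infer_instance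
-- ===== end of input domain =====

-- B replaces A's single interleaved accumulation loop with a two-pass decomposition per city
-- (group raw strings by index name, then aggregate each group); objective: alternative, same cost.


-- ===== PORT A =====
-- calScoreMap[v]: first-match lookup in the association list (exact under Pre_, which demands v to be a key)
def pvCalGet (cal : List (String × Int)) (v : String) : Int := (List.lookup v cal).getD 0
-- v.split(","): sep ≠ "" so PySem.Str.split? is `some`; getD [] never fires
def pvSplit (v : String) : List String := (PySem.Str.split? v ",").getD []

-- body of A's inner loop: one v updates (scoreMap[city], scoreIndexNames[city])
def pvStepA (cal : List (String × Int)) (st : PySem.Dict String Int × PySem.Dict String String)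
    (v : String) : PySem.Dict String Int × PySem.Dict String String :=
  let indexName := pvSplit v
  let k := PySem.List.pyGetD indexName 0 ""
  if st.1.contains k then
    (st.1.insert k (st.1.getD k 0 + pvCalGet cal v),
     st.2.insert k (st.2.getD k "" ++ "," ++ PySem.List.pyGetD indexName 1 ""))
  else
    (st.1.insert k (pvCalGet cal v),
     st.2.insert k (PySem.List.pyGetD indexName 1 ""))

def deal_score (retIndex : List (String × List String)) (calScoreMap : List (String × Int)) :
    (List (String × List (String × Int))) × (List (String × List (String × String))) :=
  let res := retIndex.foldl
    (fun (acc : PySem.Dict String (PySem.Dict String Int) × PySem.Dict String (PySem.Dict String String)) cv =>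
      let inner := cv.2.foldl (pvStepA calScoreMap) (PySem.Dict.empty, PySem.Dict.empty)
      (acc.1.insert cv.1 inner.1, acc.2.insert cv.1 inner.2))
    (PySem.Dict.empty, PySem.Dict.empty)
  (res.1.items.map (fun p => (p.1, p.2.items)), res.2.items.map (fun p => (p.1, p.2.items)))

-- ===== PORT B =====
def pvKey (v : String) : String := PySem.List.pyGetD (pvSplit v) 0 ""
def pvName (v : String) : String := PySem.List.pyGetD (pvSplit v) 1 ""

-- groups.setdefault(v.split(",")[0], []).append(v)
def pvGroupStep (g : PySem.Dict String (List String)) (v : String) : PySem.Dict String (List String) :=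
  let g1 := g.setdefault (pvKey v) []
  g1.insert (pvKey v) (g1.getD (pvKey v) [] ++ [v])

def pvGroups (vs : List String) : PySem.Dict String (List String) :=
  vs.foldl pvGroupStep PySem.Dict.empty

def pvCityScore (cal : List (String × Int)) (g : List String) : Int := (g.map (pvCalGet cal)).sum
def pvCityNames (g : List String) : String := PySem.Str.join "," (g.map pvName)

def deal_score_alt (retIndex : List (String × List String)) (calScoreMap : List (String × Int)) :
    (List (String × List (String × Int))) × (List (String × List (String × String))) :=
  let res := retIndex.foldl
    (fun (acc : PySem.Dict String (List (String × Int)) × PySem.Dict String (List (String × String))) cv =>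
      let groups := pvGroups cv.2
      (acc.1.insert cv.1 (groups.items.map (fun p => (p.1, pvCityScore calScoreMap p.2))),
       acc.2.insert cv.1 (groups.items.map (fun p => (p.1, pvCityNames p.2)))))
    (PySem.Dict.empty, PySem.Dict.empty)
  (res.1.items, res.2.items)

-- ===== PRECONDITION & SPEC =====
-- Pre_ excludes exactly the inputs where Python A raises: a v without a comma (IndexError on
-- indexName[1]) or a v that is not a key of calScoreMap (KeyError).
def Pre_deal_score (retIndex : List (String × List String)) (calScoreMap : List (String × Int)) : Prop :=
  ∀ p ∈ retIndex, ∀ v ∈ p.2, PySem.Str.isIn "," v = true ∧ (calScoreMap.map Prod.fst).contains v = true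
instance (retIndex : List (String × List String)) (calScoreMap : List (String × Int)) : Decidable (Pre_deal_score retIndex calScoreMap) := by unfold Pre_deal_score; infer_instance
def pvWitness_deal_score : (List (String × List String)) × (List (String × Int)) :=
  ([("c", ["a,b", "a,c", "d,e"])], [("a,b", 3), ("a,c", 4), ("d,e", (-1))])

def Spec_deal_score (retIndex : List (String × List String)) (calScoreMap : List (String × Int)) (out : (List (String × List (String × Int))) × (List (String × List (String × String)))) : Prop := out = deal_score_alt retIndex calScoreMap
instance (retIndex : List (String × List String)) (calScoreMap : List (String × Int)) (out : (List (String × List (String × Int))) × (List (String × List (String × String)))) : Decidable (Spec_deal_score retIndex calScoreMap out) := by unfold Spec_deal_score; infer_instance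

-- ===== CLAIM (what is proved, stated in full; the proofs are below) =====
def Claim_equal_deal_score : Prop := ∀ (retIndex : List (String × List String)) (calScoreMap : List (String × Int)), Dom_deal_score retIndex calScoreMap → Pre_deal_score retIndex calScoreMap → Spec_deal_score retIndex calScoreMap (deal_score retIndex calScoreMap)

-- ===== LEMMAS AND PROOFS =====

-- grouping step is an insert of the extended group
lemma pvGroupStep_eq_insert (g : PySem.Dict String (List String)) (v : String) :
    pvGroupStep g v = g.insert (pvKey v) (g.getD (pvKey v) [] ++ [v]) := by
  unfold pvGroupStep
  by_cases h : g.contains (pvKey v) = true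
  · rw [PySem.Dict.setdefault_of_contains _ _ h]
  · rw [PySem.Dict.setdefault_of_not_contains _ _ (by simpa using h)]
    show (g.insert (pvKey v) []).insert (pvKey v) ((g.insert (pvKey v) []).getD (pvKey v) [] ++ [v]) = _
    rw [PySem.Dict.getD_insert_self, PySem.Dict.insert_insert_self,
        PySem.Dict.getD_of_not_contains _ _ (by simpa using h)]

-- ',' join over a nonempty list extended by one element
lemma join_append_singleton (sep x p : List Char) (xs : List (List Char)) :
    PySem.Chars.join sep ((p :: xs) ++ [x]) = PySem.Chars.join sep (p :: xs) ++ sep ++ x := by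
  induction xs generalizing p with
  | nil => rw [List.cons_append, List.nil_append, PySem.Chars.join_cons_cons,
               PySem.Chars.join_singleton, PySem.Chars.join_singleton]
  | cons q xs ih =>
      rw [List.cons_append, List.cons_append, PySem.Chars.join_cons_cons,
          PySem.Chars.join_cons_cons (rest := xs), ← List.cons_append, ih q]
      simp [List.append_assoc]

lemma pvCityNames_append (g : List String) (v : String) (hg : g ≠ []) :
    pvCityNames (g ++ [v]) = pvCityNames g ++ "," ++ pvName v := by
  obtain ⟨p, xs, rfl⟩ := List.exists_cons_of_ne_nil hg
  apply String.toList_inj.mp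
  simp only [pvCityNames, PySem.Str.toList_join, List.map_append, List.map_cons, List.map_nil,
    String.toList_append]
  exact join_append_singleton _ _ _ _

lemma pvCityScore_append (cal : List (String × Int)) (g : List String) (v : String) :
    pvCityScore cal (g ++ [v]) = pvCityScore cal g + pvCalGet cal v := by
  simp [pvCityScore]

-- relation "d' is d with values mapped through f" survives a parallel insert
lemma items_insert_map {ν ν' : Type} (f : ν → ν') (d : PySem.Dict String ν) (d' : PySem.Dict String ν')
    (h : d'.items = d.items.map (fun p => (p.1, f p.2))) (k : String) (v : ν) :
    (d'.insert k (f v)).items = (d.insert k v).items.map (fun p => (p.1, f p.2)) := by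
  have hc : d'.contains k = d.contains k := by
    rw [PySem.Dict.contains_eq_decide_mem_keys, PySem.Dict.contains_eq_decide_mem_keys]
    have : d'.keys = d.keys := by
      simp only [PySem.Dict.keys, h, List.map_map]
      rfl
    rw [this]
  rw [PySem.Dict.items_insert, PySem.Dict.items_insert, hc]
  by_cases hck : d.contains k = true
  · simp only [hck, if_true, h, List.map_map]
    apply List.map_congr_left
    intro p _
    by_cases hp : p.1 == k
    · simp [Function.comp, hp]
    · simp [Function.comp, hp]
  · simp only [Bool.not_eq_true] at hck
    simp [hck, h]

-- the per-city invariant: A's two accumulated dicts are B's aggregated groups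
lemma pvCityNames_singleton (v : String) : pvCityNames [v] = pvName v := by
  apply String.toList_inj.mp
  simp only [pvCityNames, List.map_cons, List.map_nil, PySem.Str.toList_join,
    PySem.Chars.join_singleton]

lemma pvGroups_append (vs : List String) (v : String) :
    pvGroups (vs ++ [v])
      = (pvGroups vs).insert (pvKey v) ((pvGroups vs).getD (pvKey v) [] ++ [v]) := by
  rw [pvGroups, List.foldl_append, List.foldl_cons, List.foldl_nil, ← pvGroups,
    pvGroupStep_eq_insert]

lemma city_inv (cal : List (String × Int)) (vs : List String) :
    ((vs.foldl (pvStepA cal) (PySem.Dict.empty, PySem.Dict.empty)).1.items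
        = (pvGroups vs).items.map (fun p => (p.1, pvCityScore cal p.2)))
    ∧ ((vs.foldl (pvStepA cal) (PySem.Dict.empty, PySem.Dict.empty)).2.items
        = (pvGroups vs).items.map (fun p => (p.1, pvCityNames p.2)))
    ∧ (pvGroups vs).keys.Nodup
    ∧ (∀ p ∈ (pvGroups vs).items, p.2 ≠ []) := by
  induction vs using List.reverseRecOn with
  | nil => exact ⟨rfl, rfl, List.nodup_nil, by intro p hp; cases hp⟩
  | append_singleton vs v ih =>
    obtain ⟨h1, h2, hnd, hne⟩ := ih
    set st := vs.foldl (pvStepA cal) ((PySem.Dict.empty, PySem.Dict.empty) :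
      PySem.Dict String Int × PySem.Dict String String) with hst
    set G := pvGroups vs with hGdef
    have hk1 : st.1.keys = G.keys := by
      simp only [PySem.Dict.keys, h1, List.map_map]; rfl
    have hk2 : st.2.keys = G.keys := by
      simp only [PySem.Dict.keys, h2, List.map_map]; rfl
    have hc1 : st.1.contains (pvKey v) = G.contains (pvKey v) := by
      rw [PySem.Dict.contains_eq_decide_mem_keys, PySem.Dict.contains_eq_decide_mem_keys, hk1]
    have hc2 : st.2.contains (pvKey v) = G.contains (pvKey v) := by
      rw [PySem.Dict.contains_eq_decide_mem_keys, PySem.Dict.contains_eq_decide_mem_keys, hk2]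
    have hfold : (vs ++ [v]).foldl (pvStepA cal) (PySem.Dict.empty, PySem.Dict.empty)
        = pvStepA cal st v := by
      rw [List.foldl_append, List.foldl_cons, List.foldl_nil]
    have hstep : pvStepA cal st v =
        (if st.1.contains (pvKey v) then
          (st.1.insert (pvKey v) (st.1.getD (pvKey v) 0 + pvCalGet cal v),
           st.2.insert (pvKey v) (st.2.getD (pvKey v) "" ++ "," ++ pvName v))
        else
          (st.1.insert (pvKey v) (pvCalGet cal v), st.2.insert (pvKey v) (pvName v))) := rfl
    rw [hfold, hstep, pvGroups_append, ← hGdef]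
    have hGnd' : (G.insert (pvKey v) (G.getD (pvKey v) [] ++ [v])).keys.Nodup :=
      PySem.Dict.nodup_keys_insert _ _ _ hnd
    have hne' : ∀ p ∈ (G.insert (pvKey v) (G.getD (pvKey v) [] ++ [v])).items, p.2 ≠ [] := by
      intro p hp
      rcases (PySem.Dict.mem_items_insert _ _ _ _).mp hp with h | ⟨h, _⟩
      · subst h; simp
      · exact hne p h
    by_cases hc : G.contains (pvKey v) = true
    · -- key already present: both sides rewrite the existing entry
      obtain ⟨g0, hg0⟩ := Option.isSome_iff_exists.mp
        ((PySem.Dict.contains_eq_isSome_get? G (pvKey v)) ▸ hc)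
      have hgD : G.getD (pvKey v) [] = g0 := PySem.Dict.getD_of_get?_eq_some _ _ hg0
      have hg0mem : (pvKey v, g0) ∈ G.items := PySem.Dict.mem_items_of_get?_eq_some _ hg0
      have hg0ne : g0 ≠ [] := hne _ hg0mem
      have hsc : st.1.getD (pvKey v) 0 = pvCityScore cal g0 :=
        PySem.Dict.getD_of_mem_items _ (by rw [h1]; exact List.mem_map_of_mem hg0mem)
          (hk1 ▸ hnd) 0
      have hnm : st.2.getD (pvKey v) "" = pvCityNames g0 :=
        PySem.Dict.getD_of_mem_items _ (by rw [h2]; exact List.mem_map_of_mem hg0mem)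
          (hk2 ▸ hnd) ""
      rw [hc1] at hstep ⊢
      rw [if_pos hc]
      refine ⟨?_, ?_, hGnd', hne'⟩
      · rw [PySem.Dict.items_insert_of_contains _ _ (hc1.trans hc),
          PySem.Dict.items_insert_of_contains _ _ hc, h1, List.map_map, List.map_map]
        apply List.map_congr_left
        intro p _
        by_cases hp : p.1 == pvKey v
        · simp only [Function.comp, hp, if_pos]
          rw [hsc, hgD, pvCityScore_append]
        · simp [Function.comp, hp]
      · rw [PySem.Dict.items_insert_of_contains _ _ (hc2.trans hc),
          PySem.Dict.items_insert_of_contains _ _ hc, h2, List.map_map, List.map_map]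
        apply List.map_congr_left
        intro p _
        by_cases hp : p.1 == pvKey v
        · simp only [Function.comp, hp, if_pos]
          rw [hnm, hgD, pvCityNames_append _ _ hg0ne]
        · simp [Function.comp, hp]
    · -- fresh key: both sides append a new entry
      have hc' : G.contains (pvKey v) = false := by simpa using hc
      have hgD : G.getD (pvKey v) [] = [] := PySem.Dict.getD_of_not_contains _ _ hc'
      rw [hc1, if_neg hc]
      refine ⟨?_, ?_, hGnd', hne'⟩
      · rw [PySem.Dict.items_insert_of_not_contains _ _ (hc1.trans hc'),
          PySem.Dict.items_insert_of_not_contains _ _ hc', List.map_append, h1, hgD]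
        simp [pvCityScore]
      · rw [PySem.Dict.items_insert_of_not_contains _ _ (hc2.trans hc'),
          PySem.Dict.items_insert_of_not_contains _ _ hc', List.map_append, h2, hgD]
        simp [pvCityNames_singleton]

-- outer fold: inserting mapped per-city values preserves the items relation
lemma outer_fold {ν ν' : Type} (f : ν → ν') (body : String × List String → ν)
    (l : List (String × List String)) (d : PySem.Dict String ν) (d' : PySem.Dict String ν')
    (h : d'.items = d.items.map (fun p => (p.1, f p.2))) :
    (l.foldl (fun acc cv => acc.insert cv.1 (f (body cv))) d').items
      = (l.foldl (fun acc cv => acc.insert cv.1 (body cv)) d).items.map (fun p => (p.1, f p.2)) := by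
  induction l generalizing d d' with
  | nil => simpa using h
  | cons cv l ih => exact ih _ _ (items_insert_map f _ _ h cv.1 (body cv))

lemma deal_score_main (retIndex : List (String × List String)) (calScoreMap : List (String × Int)) :
    deal_score retIndex calScoreMap = deal_score_alt retIndex calScoreMap := by
  unfold deal_score deal_score_alt
  rw [PySem.List.foldl_prod_mk
        (fun (a : PySem.Dict String (PySem.Dict String Int)) (cv : String × List String) =>
          a.insert cv.1 (List.foldl (pvStepA calScoreMap) (PySem.Dict.empty, PySem.Dict.empty) cv.2).1)
        (fun (b : PySem.Dict String (PySem.Dict String String)) cv =>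
          b.insert cv.1 (List.foldl (pvStepA calScoreMap) (PySem.Dict.empty, PySem.Dict.empty) cv.2).2)
        retIndex PySem.Dict.empty PySem.Dict.empty,
      PySem.List.foldl_prod_mk
        (fun (a : PySem.Dict String (List (String × Int))) (cv : String × List String) =>
          a.insert cv.1 (List.map (fun p => (p.1, pvCityScore calScoreMap p.2)) (pvGroups cv.2).items))
        (fun (b : PySem.Dict String (List (String × String))) cv =>
          b.insert cv.1 (List.map (fun p => (p.1, pvCityNames p.2)) (pvGroups cv.2).items))
        retIndex PySem.Dict.empty PySem.Dict.empty]
  have hb1 : (fun (acc : PySem.Dict String (List (String × Int))) (cv : String × List String) =>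
      acc.insert cv.1 ((pvGroups cv.2).items.map (fun p => (p.1, pvCityScore calScoreMap p.2))))
      = fun acc cv => acc.insert cv.1
          (PySem.Dict.items (cv.2.foldl (pvStepA calScoreMap) (PySem.Dict.empty, PySem.Dict.empty)).1) := by
    funext acc cv
    rw [(city_inv calScoreMap cv.2).1]
  have hb2 : (fun (acc : PySem.Dict String (List (String × String))) (cv : String × List String) =>
      acc.insert cv.1 ((pvGroups cv.2).items.map (fun p => (p.1, pvCityNames p.2))))
      = fun acc cv => acc.insert cv.1
          (PySem.Dict.items (cv.2.foldl (pvStepA calScoreMap) (PySem.Dict.empty, PySem.Dict.empty)).2) := by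
    funext acc cv
    rw [(city_inv calScoreMap cv.2).2.1]
  rw [hb1, hb2]
  exact (congrArg₂ Prod.mk
    (outer_fold (f := PySem.Dict.items)
      (body := fun cv => (cv.2.foldl (pvStepA calScoreMap) (PySem.Dict.empty, PySem.Dict.empty)).1)
      retIndex PySem.Dict.empty PySem.Dict.empty rfl)
    (outer_fold (f := PySem.Dict.items)
      (body := fun cv => (cv.2.foldl (pvStepA calScoreMap) (PySem.Dict.empty, PySem.Dict.empty)).2)
      retIndex PySem.Dict.empty PySem.Dict.empty rfl)).symm

-- ===== VERDICT (by name: the statement is the Claim_ definition above) =====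
theorem deal_score_spec : Claim_equal_deal_score := by
  intro retIndex calScoreMap _ _
  unfold Spec_deal_score
  exact deal_score_main retIndex calScoreMap
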